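-- pv_equiv track=rewrite | github.com/miliar/Code_Jam_Webscraper | solutions_python/Problem_187/618.py | calc
-- ===== SOURCE A (Python) =====
-- import heapq
--
-- def idx2chr(idx):
--     return  chr(ord('A') + idx)
--
-- def calc(nums):
--     q = [(-x, i) for i, x in enumerate(nums)]
--     heapq.heapify(q)
--     r = []
--     while q:
--         action = ''
--         x = heapq.heappop(q)
--         action += idx2chr(x[1])
--         if x[0] < -1:
--             heapq.heappush(q, (x[0]+1, x[1]))
--         if q:
--             x = heapq.heappop(q)
--             if len(q) == 1 and x[0] == -1:
--                 # Don't leave one group.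
--                 heapq.heappush(q, x)
--             else:
--                 action += idx2chr(x[1])
--                 if x[0] < -1:
--                     heapq.heappush(q, (x[0]+1, x[1]))
--         r.append(action)
--     return r
-- ===== SOURCE B (Python) =====
-- def idx2chr(idx):
--     return chr(ord('A') + idx)
--
-- def calc(nums):
--     # greedy by linear scan over a list of [index, count] groups
--     groups = [[i, c] for i, c in enumerate(nums)]
--     r = []
--
--     def pick():
--         best = groups[0]
--         for g in groups[1:]:
--             if g[1] > best[1]:
--                 best = g
--         return best
--
--     def take(g):
--         if g[1] > 1:
--             g[1] -= 1
--         else: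
--             groups.remove(g)
--
--     while groups:
--         g = pick()
--         action = idx2chr(g[0])
--         take(g)
--         if groups:
--             g = pick()
--             if len(groups) == 2 and g[1] == 1:
--                 pass  # don't leave a single group behind
--             else:
--                 action += idx2chr(g[0])
--                 take(g)
--         r.append(action)
--     return r
-- ===== Notes on version B (the rewrite author's own statement) =====
-- stated objective: alternative
-- what changed: Replaces A's heapq priority queue (heapify/heappop/heappush of (-count,index) pairs) with a plain mutable list of (index,count) groups scanned linearly for the current maximum each round, with in-place decrement/removal bookkeeping.
import Mathlib
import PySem

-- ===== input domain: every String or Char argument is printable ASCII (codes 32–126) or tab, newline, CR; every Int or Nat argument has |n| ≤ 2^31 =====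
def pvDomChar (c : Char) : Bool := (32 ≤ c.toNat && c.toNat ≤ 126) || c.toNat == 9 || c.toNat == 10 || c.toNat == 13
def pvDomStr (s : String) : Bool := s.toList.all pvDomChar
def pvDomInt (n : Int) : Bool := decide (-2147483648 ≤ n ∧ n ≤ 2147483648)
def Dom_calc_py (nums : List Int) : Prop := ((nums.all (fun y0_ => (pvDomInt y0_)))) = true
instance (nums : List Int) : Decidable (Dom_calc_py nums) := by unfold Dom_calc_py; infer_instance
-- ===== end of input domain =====

-- B re-implements the greedy scheduler with linear scans over (index, count) pairs
-- instead of A's heap; equal return values, no claim about speed.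

-- ===== PORT A =====
def idx2chrA (idx : Int) : String := String.ofList [Char.ofNat (65 + idx).toNat]

-- Python's heapq is ported as a sorted-list priority queue: all queue elements are
-- distinct pairs (indices differ), and the program only observes pop order, which for
-- heapq is exactly ascending order of the pairs — so this port is exact here.
def heapPush : List (Int × Int) → (Int × Int) → List (Int × Int)
  | [], p => [p]
  | h :: t, p =>
    if p.1 < h.1 ∨ (p.1 = h.1 ∧ p.2 ≤ h.2) then p :: h :: t else h :: heapPush t p

def heapify (l : List (Int × Int)) : List (Int × Int) := l.foldl heapPush []

-- "if x[0] < -1: heappush(q, (x[0]+1, x[1]))" after a pop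
def stepA (x : Int × Int) (q : List (Int × Int)) : List (Int × Int) :=
  if x.1 < -1 then heapPush q (x.1 + 1, x.2) else q

def hMeas (q : List (Int × Int)) : Nat := (q.map (fun p => (max (-p.1) 1).toNat)).sum

theorem heapPush_perm (q : List (Int × Int)) (p : Int × Int) :
    (heapPush q p).Perm (p :: q) := by
  induction q with
  | nil => simp [heapPush]
  | cons h t ih =>
    unfold heapPush
    split
    · exact List.Perm.refl _
    · exact (List.Perm.cons h ih).trans (List.Perm.swap p h t)

theorem hMeas_heapPush (q : List (Int × Int)) (p : Int × Int) :
    hMeas (heapPush q p) = (max (-p.1) 1).toNat + hMeas q := by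
  have := (heapPush_perm q p).map (fun p => (max (-p.1) 1).toNat)
  unfold hMeas
  rw [this.sum_eq]; simp

theorem hMeas_step (x : Int × Int) (q : List (Int × Int)) :
    hMeas (stepA x q) < hMeas (x :: q) := by
  unfold stepA
  split
  · rw [hMeas_heapPush]
    simp only [hMeas, List.map_cons, List.sum_cons]
    omega
  · simp only [hMeas, List.map_cons, List.sum_cons]
    omega

def aLoop : List (Int × Int) → List String
  | [] => []
  | x :: q1 =>
    let action := idx2chrA x.2
    match h2 : stepA x q1 with
    | [] => [action]
    | y :: q3 =>
      if q3.length = 1 ∧ y.1 = -1 then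
        action :: aLoop (y :: q3)
      else
        (action ++ idx2chrA y.2) :: aLoop (stepA y q3)
termination_by q => hMeas q
decreasing_by
  · rw [← h2]; exact hMeas_step x q1
  · calc hMeas (stepA y q3) < hMeas (y :: q3) := hMeas_step y q3
      _ = hMeas (stepA x q1) := by rw [h2]
      _ < hMeas (x :: q1) := hMeas_step x q1

def calc_py (nums : List Int) : List String :=
  aLoop (heapify ((PySem.List.enumerate nums).map (fun p => (-p.2, p.1))))

-- ===== PORT B =====
def idx2chrB (idx : Int) : String := String.ofList [Char.ofNat (65 + idx).toNat]

-- "g[1] -= 1" on the (unique) occurrence of g in the group list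
def decFirst : List (Int × Int) → (Int × Int) → List (Int × Int)
  | [], _ => []
  | h :: t, g => if h = g then (h.1, h.2 - 1) :: t else h :: decFirst t g

-- "groups.remove(g)"
def removeFirst : List (Int × Int) → (Int × Int) → List (Int × Int)
  | [], _ => []
  | h :: t, g => if h = g then t else h :: removeFirst t g

-- B's take(): decrement the group's count, or drop it when it is ≤ 1
def takeB (gs : List (Int × Int)) (g : Int × Int) : List (Int × Int) :=
  if g.2 > 1 then decFirst gs g else removeFirst gs g

def bMeas (gs : List (Int × Int)) : Nat := (gs.map (fun g => (max g.2 1).toNat)).sum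

theorem pickB_mem (l : List (Int × Int)) (b : Int × Int) :
    l.foldl (fun b h => if h.2 > b.2 then h else b) b ∈ b :: l := by
  induction l generalizing b with
  | nil => simp
  | cons c t ih =>
    simp only [List.foldl_cons]
    rcases List.mem_cons.mp (ih (if c.2 > b.2 then c else b)) with h | h
    · rw [h]; split <;> simp
    · simp [List.mem_cons, h]

theorem bMeas_decFirst (gs : List (Int × Int)) (g : Int × Int) (hg : g ∈ gs)
    (hc : g.2 > 1) : bMeas (decFirst gs g) < bMeas gs := by
  induction gs with
  | nil => cases hg
  | cons h t ih =>
    unfold decFirst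
    by_cases he : h = g
    · subst he
      rw [if_pos rfl]
      simp only [bMeas, List.map_cons, List.sum_cons]
      omega
    · rw [if_neg he]
      have hg' : g ∈ t := by cases hg with | head => exact absurd rfl he | tail _ h => exact h
      have := ih hg'
      simp only [bMeas, List.map_cons, List.sum_cons] at *
      omega

theorem bMeas_removeFirst (gs : List (Int × Int)) (g : Int × Int) (hg : g ∈ gs) :
    bMeas (removeFirst gs g) < bMeas gs := by
  induction gs with
  | nil => cases hg
  | cons h t ih =>
    unfold removeFirst
    by_cases he : h = g
    · subst he
      rw [if_pos rfl]
      simp only [bMeas, List.map_cons, List.sum_cons]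
      omega
    · rw [if_neg he]
      have hg' : g ∈ t := by cases hg with | head => exact absurd rfl he | tail _ h => exact h
      have := ih hg'
      simp only [bMeas, List.map_cons, List.sum_cons] at *
      omega

theorem bMeas_takeB (gs : List (Int × Int)) (g : Int × Int) (hg : g ∈ gs) :
    bMeas (takeB gs g) < bMeas gs := by
  unfold takeB
  split
  · exact bMeas_decFirst gs g hg (by assumption)
  · exact bMeas_removeFirst gs g hg

def bLoop : List (Int × Int) → List String
  | [] => []
  | g0 :: gt =>
    let action := idx2chrB (gt.foldl (fun b h => if h.2 > b.2 then h else b) g0).1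
    match h2 : takeB (g0 :: gt) (gt.foldl (fun b h => if h.2 > b.2 then h else b) g0) with
    | [] => [action]
    | h0 :: ht =>
      if (h0 :: ht).length = 2 ∧ (ht.foldl (fun b h => if h.2 > b.2 then h else b) h0).2 = 1 then
        action :: bLoop (h0 :: ht)
      else
        (action ++ idx2chrB (ht.foldl (fun b h => if h.2 > b.2 then h else b) h0).1) ::
          bLoop (takeB (h0 :: ht) (ht.foldl (fun b h => if h.2 > b.2 then h else b) h0))
termination_by gs => bMeas gs
decreasing_by
  · rw [← h2]
    exact bMeas_takeB _ _ (pickB_mem gt g0)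
  · calc bMeas (takeB (h0 :: ht) _) < bMeas (h0 :: ht) :=
          bMeas_takeB _ _ (pickB_mem ht h0)
      _ = bMeas (takeB (g0 :: gt) _) := (congrArg bMeas h2).symm
      _ < bMeas (g0 :: gt) := bMeas_takeB _ _ (pickB_mem gt g0)

def calc_py_alt (nums : List Int) : List String :=
  bLoop (PySem.List.enumerate nums)

-- ===== PRECONDITION & SPEC =====
def Spec_calc_py (nums : List Int) (out : List String) : Prop := out = calc_py_alt nums
instance (nums : List Int) (out : List String) : Decidable (Spec_calc_py nums out) := by unfold Spec_calc_py; infer_instance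

-- ===== CLAIM (what is proved, stated in full; the proofs are below) =====
def Claim_equal_calc_py : Prop := ∀ (nums : List Int), Dom_calc_py nums → Spec_calc_py nums (calc_py nums)

-- ===== LEMMAS AND PROOFS =====

-- the queue order used by port A
def ple (p q : Int × Int) : Prop := p.1 < q.1 ∨ (p.1 = q.1 ∧ p.2 ≤ q.2)

-- fq maps an (index, count) group to its queue entry (-count, index)
def fq (g : Int × Int) : Int × Int := (-g.2, g.1)

theorem heapPush_sorted (q : List (Int × Int)) (p : Int × Int)
    (hs : q.Pairwise ple) : (heapPush q p).Pairwise ple := by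
  induction q with
  | nil => simp [heapPush]
  | cons h t ih =>
    rcases List.pairwise_cons.mp hs with ⟨hh, ht⟩
    unfold heapPush
    split
    · rename_i hc
      refine List.pairwise_cons.mpr ⟨?_, hs⟩
      intro y hy
      rcases List.mem_cons.mp hy with rfl | hy
      · unfold ple; omega
      · have := hh y hy
        unfold ple at *; omega
    · rename_i hc
      refine List.pairwise_cons.mpr ⟨?_, ih ht⟩
      intro y hy
      rcases List.mem_cons.mp ((heapPush_perm t p).mem_iff.mp hy) with rfl | hy
      · unfold ple; push_neg at hc; omega
      · exact hh y hy

theorem heapify_perm (l acc : List (Int × Int)) :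
    (l.foldl heapPush acc).Perm (acc ++ l) := by
  induction l generalizing acc with
  | nil => simp
  | cons h t ih =>
    simp only [List.foldl_cons]
    exact (ih (heapPush acc h)).trans
      (((heapPush_perm acc h).append_right t).trans List.perm_middle.symm)

theorem heapify_sorted (l acc : List (Int × Int)) (hs : acc.Pairwise ple) :
    (l.foldl heapPush acc).Pairwise ple := by
  induction l generalizing acc with
  | nil => exact hs
  | cons h t ih => exact ih _ (heapPush_sorted acc h hs)

-- the scan used by port B picks the group with maximal count, ties to smallest index
theorem pickB_spec (l : List (Int × Int)) (b : Int × Int)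
    (hp : (b :: l).Pairwise (fun a c => a.1 < c.1)) :
    ∀ h ∈ b :: l, h.2 < (l.foldl (fun b h => if h.2 > b.2 then h else b) b).2 ∨
      (h.2 = (l.foldl (fun b h => if h.2 > b.2 then h else b) b).2 ∧
       (l.foldl (fun b h => if h.2 > b.2 then h else b) b).1 ≤ h.1) := by
  induction l generalizing b with
  | nil =>
    intro h hh
    simp only [List.mem_singleton] at hh
    subst hh
    simp
  | cons c t ih =>
    rcases List.pairwise_cons.mp hp with ⟨hb, hct⟩
    rcases List.pairwise_cons.mp hct with ⟨hc, htt⟩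
    have hbc : b.1 < c.1 := hb c (by simp)
    simp only [List.foldl_cons]
    by_cases hcb : c.2 > b.2
    · rw [if_pos hcb]
      have ihs := ih c hct
      intro h hh
      rcases List.mem_cons.mp hh with rfl | hh
      · have := ihs c (by simp)
        left; omega
      · exact ihs h hh
    · rw [if_neg hcb]
      have hp' : (b :: t).Pairwise (fun a c => a.1 < c.1) := by
        refine List.pairwise_cons.mpr ⟨?_, htt⟩
        intro y hy; exact hb y (by simp [hy])
      have ihs := ih b hp'
      intro h hh
      rcases List.mem_cons.mp hh with rfl | hh
      · exact ihs h (by simp)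
      rcases List.mem_cons.mp hh with rfl | hh
      · have hbp := ihs b (by simp)
        rcases hbp with hlt | ⟨heq, hle⟩
        · left; omega
        · by_cases hce : h.2 = (t.foldl (fun b h => if h.2 > b.2 then h else b) b).2
          · right
            refine ⟨hce, ?_⟩
            rcases List.mem_cons.mp (pickB_mem t b) with hm | hm
            · omega
            · have := (List.pairwise_cons.mp hp').1 _ hm
              omega
          · left; omega
      · exact ihs h (by simp [hh])

theorem pairwise_fst_ne {gs : List (Int × Int)}
    (hp : gs.Pairwise (fun a c => a.1 < c.1)) :
    ∀ a ∈ gs, ∀ b ∈ gs, a.1 = b.1 → a = b := by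
  have hsym : Symmetric (fun a c : Int × Int => a.1 ≠ c.1) := by
    intro a b h; omega
  have h2 := (hp.imp (fun {a c} h => by omega : ∀ {a c : Int × Int}, a.1 < c.1 → a.1 ≠ c.1))
  intro a ha b hb hab
  by_contra hne
  exact (h2.forall hsym ha hb hne) hab

theorem decFirst_split (l r : List (Int × Int)) (g : Int × Int) (hl : g ∉ l) :
    decFirst (l ++ g :: r) g = l ++ (g.1, g.2 - 1) :: r := by
  induction l with
  | nil => simp [decFirst]
  | cons h t ih =>
    have : h ≠ g := by intro e; exact hl (by simp [e])
    simp only [List.cons_append, decFirst, if_neg this]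
    rw [ih (by intro m; exact hl (by simp [m]))]

theorem removeFirst_split (l r : List (Int × Int)) (g : Int × Int) (hl : g ∉ l) :
    removeFirst (l ++ g :: r) g = l ++ r := by
  induction l with
  | nil => simp [removeFirst]
  | cons h t ih =>
    have : h ≠ g := by intro e; exact hl (by simp [e])
    simp only [List.cons_append, removeFirst, if_neg this]
    rw [ih (by intro m; exact hl (by simp [m]))]

-- head of the sorted queue = B's pick
theorem head_eq_pick (x : Int × Int) (q1 : List (Int × Int)) (g0 : Int × Int)
    (gt : List (Int × Int))
    (hs : (x :: q1).Pairwise ple)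
    (hperm : (x :: q1).Perm ((g0 :: gt).map fq))
    (hp : (g0 :: gt).Pairwise (fun a c => a.1 < c.1)) :
    x = fq (gt.foldl (fun b h => if h.2 > b.2 then h else b) g0) := by
  have hgm : gt.foldl (fun b h => if h.2 > b.2 then h else b) g0 ∈ g0 :: gt := pickB_mem gt g0
  have hxm : x ∈ (g0 :: gt).map fq := hperm.mem_iff.mp (by simp)
  rcases List.mem_map.mp hxm with ⟨h, hh, hfx⟩
  have hfg : fq (gt.foldl (fun b h => if h.2 > b.2 then h else b) g0) ∈ x :: q1 :=
    hperm.mem_iff.mpr (List.mem_map.mpr ⟨_, hgm, rfl⟩)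
  have hmin : ∀ y ∈ x :: q1, ple x y ∨ y = x := by
    intro y hy
    rcases List.mem_cons.mp hy with rfl | hy
    · right; rfl
    · exact Or.inl ((List.pairwise_cons.mp hs).1 y hy)
  rcases hmin _ hfg with hle | heq
  · have hspec := pickB_spec gt g0 hp h hh
    rcases hspec with hlt | ⟨heq2, hle2⟩
    · exfalso
      subst hfx
      unfold ple fq at *
      omega
    · subst hfx
      by_cases hgh : gt.foldl (fun b h => if h.2 > b.2 then h else b) g0 = h
      · rw [hgh]
      · exfalso
        have : (gt.foldl (fun b h => if h.2 > b.2 then h else b) g0).1 ≠ h.1 :=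
          fun e => hgh (pairwise_fst_ne hp _ hgm h hh e)
        unfold ple fq at *
        omega
  · exact heq.symm

theorem mem_split_unique (gs : List (Int × Int)) (g : Int × Int) (hg : g ∈ gs) :
    ∃ l r, gs = l ++ g :: r ∧ g ∉ l := by
  induction gs with
  | nil => cases hg
  | cons h t ih =>
    by_cases he : h = g
    · exact ⟨[], t, by simp [he], by simp⟩
    · have hg' : g ∈ t := by cases hg with | head => exact absurd rfl he | tail _ h => exact h
      rcases ih hg' with ⟨l, r, hsplit, hnl⟩
      refine ⟨h :: l, r, by simp [hsplit], ?_⟩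
      simp only [List.mem_cons, not_or]
      exact ⟨fun e => he e.symm, hnl⟩

theorem pairwise_replace (l r : List (Int × Int)) (g g' : Int × Int)
    (hp : (l ++ g :: r).Pairwise (fun a c => a.1 < c.1)) (h1 : g'.1 = g.1) :
    (l ++ g' :: r).Pairwise (fun a c => a.1 < c.1) := by
  rw [List.pairwise_append] at hp ⊢
  rcases hp with ⟨hl, hgr, hcross⟩
  rcases List.pairwise_cons.mp hgr with ⟨hgr1, hr⟩
  refine ⟨hl, List.pairwise_cons.mpr ⟨?_, hr⟩, ?_⟩
  · intro y hy; have := hgr1 y hy; omega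
  · intro a ha b hb
    have := hcross a ha
    rcases List.mem_cons.mp hb with rfl | hb
    · have := this g (by simp); omega
    · exact this b (by simp [hb])

-- one combined step lemma: after taking the picked group, the queue/groups stay related
theorem take_step (x : Int × Int) (q1 : List (Int × Int)) (gs : List (Int × Int))
    (g : Int × Int)
    (hs : (x :: q1).Pairwise ple)
    (hperm : (x :: q1).Perm (gs.map fq))
    (hp : gs.Pairwise (fun a c => a.1 < c.1))
    (hg : g ∈ gs) (hx : x = fq g) :
    ((stepA x q1).Pairwise ple) ∧
    ((stepA x q1).Perm ((takeB gs g).map fq)) ∧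
    ((takeB gs g).Pairwise (fun a c => a.1 < c.1)) := by
  rcases mem_split_unique gs g hg with ⟨l, r, rfl, hnl⟩
  have hq1s : q1.Pairwise ple := (List.pairwise_cons.mp hs).2
  have hq1p : q1.Perm (l.map fq ++ r.map fq) := by
    have : (x :: q1).Perm (x :: (l.map fq ++ r.map fq)) := by
      refine hperm.trans ?_
      rw [List.map_append, List.map_cons, hx]
      exact List.perm_middle
    exact this.cons_inv
  have hxg : x.1 = -g.2 ∧ x.2 = g.1 := by rw [hx]; exact ⟨rfl, rfl⟩
  unfold stepA
  by_cases hc : x.1 < -1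
  · have hgc : g.2 > 1 := by omega
    rw [if_pos hc]
    unfold takeB
    rw [if_pos hgc, decFirst_split l r g hnl]
    refine ⟨heapPush_sorted _ _ hq1s, ?_, pairwise_replace l r g (g.1, g.2 - 1) hp rfl⟩
    refine (heapPush_perm q1 _).trans ?_
    rw [List.map_append, List.map_cons]
    refine List.Perm.trans ?_ List.perm_middle.symm
    have : (x.1 + 1, x.2) = fq (g.1, g.2 - 1) := by
      unfold fq
      refine Prod.ext ?_ ?_
      · simp; omega
      · simp [hxg.2]
    rw [this]
    exact hq1p.cons _
  · have hgc : ¬ g.2 > 1 := by omega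
    rw [if_neg hc]
    unfold takeB
    rw [if_neg hgc, removeFirst_split l r g hnl, List.map_append]
    exact ⟨hq1s, hq1p, (hp.sublist (by simp))⟩

theorem aLoop_cons_nil (x : Int × Int) (q1 : List (Int × Int)) (h : stepA x q1 = []) :
    aLoop (x :: q1) = [idx2chrA x.2] := by
  rw [aLoop]
  split
  · rfl
  · rename_i y' q3' heq
    rw [h] at heq
    cases heq

theorem aLoop_cons_cons (x : Int × Int) (q1 : List (Int × Int)) (y : Int × Int)
    (q3 : List (Int × Int)) (h : stepA x q1 = y :: q3) :
    aLoop (x :: q1) =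
      if q3.length = 1 ∧ y.1 = -1 then idx2chrA x.2 :: aLoop (y :: q3)
      else (idx2chrA x.2 ++ idx2chrA y.2) :: aLoop (stepA y q3) := by
  rw [aLoop]
  split
  · rename_i heq
    rw [h] at heq
    cases heq
  · rename_i y' q3' heq
    rw [h] at heq
    cases heq
    rfl

theorem bLoop_cons_nil (g0 : Int × Int) (gt : List (Int × Int))
    (h : takeB (g0 :: gt) (gt.foldl (fun b h => if h.2 > b.2 then h else b) g0) = []) :
    bLoop (g0 :: gt) = [idx2chrB (gt.foldl (fun b h => if h.2 > b.2 then h else b) g0).1] := by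
  rw [bLoop]
  split
  · rfl
  · rename_i h0' ht' heq
    rw [h] at heq
    cases heq

theorem bLoop_cons_cons (g0 : Int × Int) (gt : List (Int × Int)) (h0 : Int × Int)
    (ht : List (Int × Int))
    (h : takeB (g0 :: gt) (gt.foldl (fun b h => if h.2 > b.2 then h else b) g0) = h0 :: ht) :
    bLoop (g0 :: gt) =
      if (h0 :: ht).length = 2 ∧ (ht.foldl (fun b h => if h.2 > b.2 then h else b) h0).2 = 1 then
        idx2chrB (gt.foldl (fun b h => if h.2 > b.2 then h else b) g0).1 :: bLoop (h0 :: ht)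
      else
        (idx2chrB (gt.foldl (fun b h => if h.2 > b.2 then h else b) g0).1 ++
            idx2chrB (ht.foldl (fun b h => if h.2 > b.2 then h else b) h0).1) ::
          bLoop (takeB (h0 :: ht) (ht.foldl (fun b h => if h.2 > b.2 then h else b) h0)) := by
  rw [bLoop]
  split
  · rename_i heq
    rw [h] at heq
    cases heq
  · rename_i h0' ht' heq
    rw [h] at heq
    cases heq
    rfl

-- the main loop equivalence
theorem loop_eq (n : Nat) : ∀ (q gs : List (Int × Int)),
    bMeas gs ≤ n →
    q.Pairwise ple → q.Perm (gs.map fq) →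
    gs.Pairwise (fun a c => a.1 < c.1) →
    aLoop q = bLoop gs := by
  induction n with
  | zero =>
    intro q gs hm hs hperm hp
    cases gs with
    | nil =>
      have : q = [] := by simpa using hperm
      simp [this, aLoop, bLoop]
    | cons g0 gt =>
      exfalso
      simp only [bMeas, List.map_cons, List.sum_cons] at hm
      omega
  | succ n ih =>
    intro q gs hm hs hperm hp
    cases gs with
    | nil =>
      have : q = [] := by simpa using hperm
      simp [this, aLoop, bLoop]
    | cons g0 gt =>
      cases q with
      | nil => exact absurd (hperm.length_eq) (by simp)
      | cons x q1 =>
        have hx : x = fq (gt.foldl (fun b h => if h.2 > b.2 then h else b) g0) :=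
          head_eq_pick x q1 g0 gt hs hperm hp
        have hgm := pickB_mem gt g0
        obtain ⟨hs2, hperm2, hp2⟩ := take_step x q1 (g0 :: gt) _ hs hperm hp hgm hx
        have hact : idx2chrA x.2 = idx2chrB (gt.foldl (fun b h => if h.2 > b.2 then h else b) g0).1 := by
          rw [hx]; rfl
        have hmeas1 : bMeas (takeB (g0 :: gt) (gt.foldl (fun b h => if h.2 > b.2 then h else b) g0)) < bMeas (g0 :: gt) :=
          bMeas_takeB _ _ hgm
        have hlen : (stepA x q1).length
            = (takeB (g0 :: gt) (gt.foldl (fun b h => if h.2 > b.2 then h else b) g0)).length := by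
          rw [hperm2.length_eq, List.length_map]
        cases hq2 : stepA x q1 with
        | nil =>
          cases htk : takeB (g0 :: gt) (gt.foldl (fun b h => if h.2 > b.2 then h else b) g0) with
          | nil => rw [aLoop_cons_nil x q1 hq2, bLoop_cons_nil g0 gt htk, hact]
          | cons h0 ht => rw [hq2, htk] at hlen; simp at hlen
        | cons y q3 =>
          cases htk : takeB (g0 :: gt) (gt.foldl (fun b h => if h.2 > b.2 then h else b) g0) with
          | nil => rw [hq2, htk] at hlen; simp at hlen
          | cons h0 ht =>
            rw [aLoop_cons_cons x q1 y q3 hq2, bLoop_cons_cons g0 gt h0 ht htk]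
            rw [hq2] at hlen hs2 hperm2
            rw [htk] at hlen hperm2 hp2 hmeas1
            have hy : y = fq (ht.foldl (fun b h => if h.2 > b.2 then h else b) h0) :=
              head_eq_pick y q3 h0 ht hs2 hperm2 hp2
            have hyg2 : y.1 = -(ht.foldl (fun b h => if h.2 > b.2 then h else b) h0).2 := by
              rw [hy]; rfl
            have hg2m := pickB_mem ht h0
            have hguard : (q3.length = 1 ∧ y.1 = -1) ↔
                ((h0 :: ht).length = 2 ∧ (ht.foldl (fun b h => if h.2 > b.2 then h else b) h0).2 = 1) := by
              have : (y :: q3).length = (h0 :: ht).length := by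
                rw [hperm2.length_eq, List.length_map]
              simp only [List.length_cons] at this ⊢
              omega
            by_cases hgd : q3.length = 1 ∧ y.1 = -1
            · rw [if_pos hgd, if_pos (hguard.mp hgd)]
              rw [hact]
              congr 1
              exact ih (y :: q3) (h0 :: ht) (by omega) hs2 hperm2 hp2
            · rw [if_neg hgd, if_neg (fun h => hgd (hguard.mpr h))]
              obtain ⟨hs3, hperm3, hp3⟩ :=
                take_step y q3 (h0 :: ht) _ hs2 hperm2 hp2 hg2m hy
              have hact2 : idx2chrA y.2 = idx2chrB (ht.foldl (fun b h => if h.2 > b.2 then h else b) h0).1 := by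
                rw [hy]; rfl
              have hmeas2 := bMeas_takeB (h0 :: ht) _ hg2m
              rw [hact, hact2]
              congr 1
              exact ih _ _ (by omega) hs3 hperm3 hp3

-- ===== VERDICT (by name: the statement is the Claim_ definition above) =====
theorem calc_py_spec : Claim_equal_calc_py := by
  intro nums _
  unfold Spec_calc_py calc_py calc_py_alt heapify
  have hperm : (((PySem.List.enumerate nums).map (fun p => (-p.2, p.1))).foldl heapPush []).Perm
      ((PySem.List.enumerate nums).map fq) := by
    have := heapify_perm ((PySem.List.enumerate nums).map (fun p => (-p.2, p.1))) []
    simpa [fq] using this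
  exact loop_eq (bMeas (PySem.List.enumerate nums)) _ _ le_rfl
    (heapify_sorted _ [] (by simp)) hperm (PySem.List.pairwise_lt_enumerate nums 0)
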